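-- pv_equiv track=rewrite | github.com/iAL-2/e7-equipment-helper | src/canonical.py | norm_slot
-- ===== SOURCE A (Python) =====
-- from typing import Optional, List, Dict, Any, Tuple
-- from typing import List, Tuple, Optional
--
-- SLOT_ALIASES: Dict[str, str] = {
--     "weapon": "weapon",
--     "helm": "helm",
--     "helmet": "helm",
--     "armor": "armor",
--     "armour": "armor",
--     "necklace": "necklace",
--     "ring": "ring",
--     "boots": "boots",
--     "boot": "boots",
-- }
--
-- def _basic_norm(x: Optional[str]) -> Optional[str]:
--     if x is None:
--         return None
--     # EasyOCR tends to emit spaces and punctuation; normalize to a key-like token.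
--     s = x.strip().lower()
--     # collapse spaces to underscores
--     s = "_".join(s.split())
--     # remove common punctuation that appears in set strings like "(0/2)"
--     s = s.replace("(", "_").replace(")", "_").replace("/", "_")
--     # collapse multiple underscores
--     while "__" in s:
--         s = s.replace("__", "_")
--     return s.strip("_")
--
-- def norm_slot(x: Optional[str]) -> Optional[str]:
--     s = _basic_norm(x)
--     if s is None:
--         return None
--
--     # direct alias
--     if s in SLOT_ALIASES:
--         return SLOT_ALIASES[s]
--
--     # compound token: e.g. "heroic_ring" / "epic_ring"
--     parts = _parts(s)
--     slot = _pick_first(parts, set(SLOT_ALIASES.values()) | set(SLOT_ALIASES.keys()))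
--     # If slot is one of canonical slots, return it.
--     if slot in {"weapon", "helm", "armor", "necklace", "ring", "boots"}:
--         return slot
--
--     # try mapping each part through aliases
--     for p in parts:
--         if p in SLOT_ALIASES:
--             cand = SLOT_ALIASES[p]
--             if cand in {"weapon", "helm", "armor", "necklace", "ring", "boots"}:
--                 return cand
--
--     return s  # fallback (will fail validation)
--
-- def _parts(s: str) -> list[str]:
--     # split on underscores and drop empties
--     return [p for p in s.split("_") if p]
--
-- def _pick_first(parts: list[str], allowed: set[str]) -> Optional[str]:
--     for p in parts:
--         if p in allowed:
--             return p
--     return None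
-- ===== SOURCE B (Python) =====
-- from typing import Optional, Dict
--
-- SLOT_ALIASES: Dict[str, str] = {
--     "weapon": "weapon",
--     "helm": "helm",
--     "helmet": "helm",
--     "armor": "armor",
--     "armour": "armor",
--     "necklace": "necklace",
--     "ring": "ring",
--     "boots": "boots",
--     "boot": "boots",
-- }
--
-- def _basic_norm(x: Optional[str]) -> Optional[str]:
--     if x is None:
--         return None
--     # EasyOCR tends to emit spaces and punctuation; normalize to a key-like token.
--     s = x.strip().lower()
--     # collapse spaces to underscores
--     s = "_".join(s.split())
--     # remove common punctuation that appears in set strings like "(0/2)"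
--     s = s.replace("(", "_").replace(")", "_").replace("/", "_")
--     # collapse multiple underscores
--     while "__" in s:
--         s = s.replace("__", "_")
--     return s.strip("_")
--
-- def norm_slot(x: Optional[str]) -> Optional[str]:
--     s = _basic_norm(x)
--     if s is None:
--         return None
--     # single left-to-right pass: the first '_'-separated token that is an
--     # alias resolves the slot (every alias maps to a canonical slot).
--     for p in s.split("_"):
--         if p in SLOT_ALIASES:
--             return SLOT_ALIASES[p]
--     return s  # fallback (will fail validation)
-- ===== Notes on version B (the rewrite author's own statement) =====
-- stated objective: simpler
-- what changed: A's direct-alias check, pick-first scan over a keys-union-values set, canonical-set test and alias-mapping loop are collapsed into one left-to-right pass that returns the alias image of the first underscore-separated token that is an alias key, exploiting that every alias value is itself a key mapping to itself; the _parts/_pick_first helpers disappear.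
import Mathlib
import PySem

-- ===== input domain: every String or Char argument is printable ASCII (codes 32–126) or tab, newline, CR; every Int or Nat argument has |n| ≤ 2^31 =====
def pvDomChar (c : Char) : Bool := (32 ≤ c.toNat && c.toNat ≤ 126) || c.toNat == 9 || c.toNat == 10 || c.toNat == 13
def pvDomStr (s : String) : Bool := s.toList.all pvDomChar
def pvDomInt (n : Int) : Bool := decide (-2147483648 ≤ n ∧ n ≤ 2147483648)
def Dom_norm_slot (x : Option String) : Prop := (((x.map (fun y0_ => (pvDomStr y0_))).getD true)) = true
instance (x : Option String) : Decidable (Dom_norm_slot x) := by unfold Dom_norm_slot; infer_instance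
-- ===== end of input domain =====

-- B replaces A's three scans over the '_'-separated tokens (pick-first over a key∪value set,
-- canonical-set test, alias-mapping loop) by one pass returning the alias image of the first
-- token that is an alias key (objective: simpler).

-- ===== PORT A =====
def SLOT_ALIASES : PySem.Dict String String := PySem.Dict.ofList
  [("weapon","weapon"),("helm","helm"),("helmet","helm"),("armor","armor"),("armour","armor"),
   ("necklace","necklace"),("ring","ring"),("boots","boots"),("boot","boots")]

-- while "__" in s: s = s.replace("__","_")  (fuel = current length; each replace of an
-- occurring "__" strictly shortens s, so length-many iterations always suffice)
def collapseUnd (fuel : Nat) (s : String) : String :=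
  match fuel with
  | 0 => s
  | f + 1 => if PySem.Str.isIn "__" s then collapseUnd f (PySem.Str.replace s "__" "_") else s

def basic_norm (x : Option String) : Option String :=
  match x with
  | none => none
  | some x =>
    let s := PySem.Str.lower (PySem.Str.strip x)
    let s := PySem.Str.join "_" (PySem.Str.split₀ s)
    let s := PySem.Str.replace (PySem.Str.replace (PySem.Str.replace s "(" "_") ")" "_") "/" "_"
    let s := collapseUnd (PySem.Str.len s).toNat s
    some (PySem.Str.stripChars s "_")

def allowedSet : PySem.Set String :=
  PySem.Set.union (PySem.Set.ofList (PySem.Dict.values SLOT_ALIASES))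
                  (PySem.Set.ofList (PySem.Dict.keys SLOT_ALIASES))

def CANON : PySem.Set String :=
  PySem.Set.ofList ["weapon", "helm", "armor", "necklace", "ring", "boots"]

-- _parts(s): s.split("_") with empties dropped (split? is none only for an empty separator)
def parts_of (s : String) : List String :=
  ((PySem.Str.split? s "_").getD []).filter (fun p => !(p == ""))

-- _pick_first(parts, allowed)
def pick_first (parts : List String) (allowed : PySem.Set String) : Option String :=
  match parts with
  | [] => none
  | p :: ps => if PySem.Set.contains allowed p then some p else pick_first ps allowed

-- 'for p in parts: if p in SLOT_ALIASES: cand = SLOT_ALIASES[p]; if cand in {…}: return cand'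
def alias_loop (parts : List String) : Option String :=
  match parts with
  | [] => none
  | p :: ps =>
    match PySem.Dict.get? SLOT_ALIASES p with
    | some cand => if PySem.Set.contains CANON cand then some cand else alias_loop ps
    | none => alias_loop ps

-- 'slot in {"weapon", "helm", "armor", "necklace", "ring", "boots"}' for an Optional slot
def slot_canon (slot : Option String) : Bool :=
  match slot with
  | some c => PySem.Set.contains CANON c
  | none => false

def norm_slot (x : Option String) : Option String :=
  match basic_norm x with
  | none => none
  | some s =>
    match PySem.Dict.get? SLOT_ALIASES s with
    | some v => some v
    | none =>
      let parts := parts_of s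
      let slot := pick_first parts allowedSet
      if slot_canon slot then slot
      else
        match alias_loop parts with
        | some c => some c
        | none => some s

-- ===== PORT B =====
-- 'for p in s.split("_"): if p in SLOT_ALIASES: return SLOT_ALIASES[p]'
def first_alias (parts : List String) : Option String :=
  match parts with
  | [] => none
  | p :: ps =>
    match PySem.Dict.get? SLOT_ALIASES p with
    | some v => some v
    | none => first_alias ps

def norm_slot_alt (x : Option String) : Option String :=
  match basic_norm x with
  | none => none
  | some s =>
    match first_alias ((PySem.Str.split? s "_").getD []) with
    | some v => some v
    | none => some s

-- ===== PRECONDITION & SPEC =====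
def Spec_norm_slot (x : Option String) (out : Option String) : Prop := out = norm_slot_alt x
instance (x : Option String) (out : Option String) : Decidable (Spec_norm_slot x out) := by unfold Spec_norm_slot; infer_instance

-- ===== CLAIM (what is proved, stated in full; the proofs are below) =====
def Claim_equal_norm_slot : Prop := ∀ (x : Option String), Dom_norm_slot x → Spec_norm_slot x (norm_slot x)

-- ===== LEMMAS AND PROOFS =====

theorem aliases_mk : SLOT_ALIASES = PySem.Dict.mk
  [("weapon","weapon"),("helm","helm"),("helmet","helm"),("armor","armor"),("armour","armor"),
   ("necklace","necklace"),("ring","ring"),("boots","boots"),("boot","boots")] := by decide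

theorem allowed_eq : allowedSet =
    ["weapon","helm","armor","necklace","ring","boots","helmet","armour","boot"] := by decide

-- get? on the literal alias dict: the nine possible (key, value) pairs
theorem get?_aliases_cases (p v : String) (h : PySem.Dict.get? SLOT_ALIASES p = some v) :
    (p = "weapon" ∧ v = "weapon") ∨ (p = "helm" ∧ v = "helm") ∨ (p = "helmet" ∧ v = "helm") ∨
    (p = "armor" ∧ v = "armor") ∨ (p = "armour" ∧ v = "armor") ∨ (p = "necklace" ∧ v = "necklace") ∨
    (p = "ring" ∧ v = "ring") ∨ (p = "boots" ∧ v = "boots") ∨ (p = "boot" ∧ v = "boots") := by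
  rw [aliases_mk] at h
  simp only [PySem.Dict.get?_mk_cons] at h
  split_ifs at h with h1 h2 h3 h4 h5 h6 h7 h8 h9 <;>
    (try simp only [Option.some.injEq] at h)
  · exact Or.inl ⟨(eq_of_beq h1).symm, h.symm⟩
  · exact Or.inr (Or.inl ⟨(eq_of_beq h2).symm, h.symm⟩)
  · exact Or.inr (Or.inr (Or.inl ⟨(eq_of_beq h3).symm, h.symm⟩))
  · exact Or.inr (Or.inr (Or.inr (Or.inl ⟨(eq_of_beq h4).symm, h.symm⟩)))
  · exact Or.inr (Or.inr (Or.inr (Or.inr (Or.inl ⟨(eq_of_beq h5).symm, h.symm⟩))))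
  · exact Or.inr (Or.inr (Or.inr (Or.inr (Or.inr (Or.inl ⟨(eq_of_beq h6).symm, h.symm⟩)))))
  · exact Or.inr (Or.inr (Or.inr (Or.inr (Or.inr (Or.inr (Or.inl ⟨(eq_of_beq h7).symm, h.symm⟩))))))
  · exact Or.inr (Or.inr (Or.inr (Or.inr (Or.inr (Or.inr (Or.inr (Or.inl ⟨(eq_of_beq h8).symm, h.symm⟩)))))))
  · exact Or.inr (Or.inr (Or.inr (Or.inr (Or.inr (Or.inr (Or.inr (Or.inr ⟨(eq_of_beq h9).symm, h.symm⟩)))))))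
  · simp [PySem.Dict.get?] at h

theorem contains_allowed_of_some (p v : String) (h : PySem.Dict.get? SLOT_ALIASES p = some v) :
    PySem.Set.contains allowedSet p = true := by
  rcases get?_aliases_cases p v h with ⟨rfl,_⟩|⟨rfl,_⟩|⟨rfl,_⟩|⟨rfl,_⟩|⟨rfl,_⟩|⟨rfl,_⟩|⟨rfl,_⟩|⟨rfl,_⟩|⟨rfl,_⟩ <;> decide

theorem mem_allowed_cases (p : String) (h : PySem.Set.contains allowedSet p = true) :
    p = "weapon" ∨ p = "helm" ∨ p = "armor" ∨ p = "necklace" ∨ p = "ring" ∨ p = "boots" ∨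
    p = "helmet" ∨ p = "armour" ∨ p = "boot" := by
  rw [allowed_eq] at h
  rw [PySem.Set.contains_iff] at h
  simpa using h

theorem contains_allowed_of_none (p : String) (h : PySem.Dict.get? SLOT_ALIASES p = none) :
    PySem.Set.contains allowedSet p = false := by
  by_cases hc : PySem.Set.contains allowedSet p = true
  · rcases mem_allowed_cases p hc with rfl|rfl|rfl|rfl|rfl|rfl|rfl|rfl|rfl <;>
      exact absurd h (by decide)
  · simpa using hc

theorem canon_mem : ("weapon" ∈ CANON) ∧ ("helm" ∈ CANON) ∧ ("armor" ∈ CANON) ∧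
    ("necklace" ∈ CANON) ∧ ("ring" ∈ CANON) ∧ ("boots" ∈ CANON) ∧
    ("helmet" ∉ CANON) ∧ ("armour" ∉ CANON) ∧ ("boot" ∉ CANON) := by decide

theorem get?_keys : PySem.Dict.get? SLOT_ALIASES "weapon" = some "weapon" ∧
    PySem.Dict.get? SLOT_ALIASES "helm" = some "helm" ∧
    PySem.Dict.get? SLOT_ALIASES "helmet" = some "helm" ∧
    PySem.Dict.get? SLOT_ALIASES "armor" = some "armor" ∧
    PySem.Dict.get? SLOT_ALIASES "armour" = some "armor" ∧
    PySem.Dict.get? SLOT_ALIASES "necklace" = some "necklace" ∧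
    PySem.Dict.get? SLOT_ALIASES "ring" = some "ring" ∧
    PySem.Dict.get? SLOT_ALIASES "boots" = some "boots" ∧
    PySem.Dict.get? SLOT_ALIASES "boot" = some "boots" := by decide

-- the core induction: A's pick/canon-test/alias-loop over the filtered tokens
-- equals B's single pass over the raw tokens
theorem core_eq (ps : List String) :
    (if slot_canon (pick_first (ps.filter (fun p => !(p == ""))) allowedSet)
       then pick_first (ps.filter (fun p => !(p == ""))) allowedSet
       else alias_loop (ps.filter (fun p => !(p == "")))) = first_alias ps := by
  induction ps with
  | nil => simp [pick_first, alias_loop, slot_canon, first_alias]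
  | cons p ps ih =>
    by_cases hp : (p == "") = true
    · have hpe : p = "" := eq_of_beq hp
      subst hpe
      simpa [first_alias, (by decide : PySem.Dict.get? SLOT_ALIASES "" = none)] using ih
    · rw [List.filter_cons_of_pos (by simpa using hp)]
      cases hg : PySem.Dict.get? SLOT_ALIASES p with
      | none =>
        have hnm : p ∉ allowedSet := fun hm => by
          have h1 := (PySem.Set.contains_iff _ _).mpr hm
          rw [contains_allowed_of_none p hg] at h1
          cases h1
        simpa [pick_first, alias_loop, first_alias, hnm, hg] using ih
      | some v =>
        have hmem : p ∈ allowedSet :=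
          (PySem.Set.contains_iff _ _).mp (contains_allowed_of_some p v hg)
        rcases get?_aliases_cases p v hg with ⟨rfl,rfl⟩|⟨rfl,rfl⟩|⟨rfl,rfl⟩|⟨rfl,rfl⟩|⟨rfl,rfl⟩|⟨rfl,rfl⟩|⟨rfl,rfl⟩|⟨rfl,rfl⟩|⟨rfl,rfl⟩ <;>
          simp [pick_first, alias_loop, slot_canon, first_alias, hmem,
                canon_mem.1, canon_mem.2.1, canon_mem.2.2.1, canon_mem.2.2.2.1,
                canon_mem.2.2.2.2.1, canon_mem.2.2.2.2.2.1, canon_mem.2.2.2.2.2.2.1,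
                canon_mem.2.2.2.2.2.2.2.1, canon_mem.2.2.2.2.2.2.2.2,
                get?_keys.1, get?_keys.2.1, get?_keys.2.2.1, get?_keys.2.2.2.1,
                get?_keys.2.2.2.2.1, get?_keys.2.2.2.2.2.1, get?_keys.2.2.2.2.2.2.1,
                get?_keys.2.2.2.2.2.2.2.1, get?_keys.2.2.2.2.2.2.2.2]

theorem norm_slot_eq (x : Option String) : norm_slot x = norm_slot_alt x := by
  unfold norm_slot norm_slot_alt
  cases hb : basic_norm x with
  | none => rfl
  | some s =>
    cases hg : PySem.Dict.get? SLOT_ALIASES s with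
    | some v =>
      rcases get?_aliases_cases s v hg with ⟨rfl,rfl⟩|⟨rfl,rfl⟩|⟨rfl,rfl⟩|⟨rfl,rfl⟩|⟨rfl,rfl⟩|⟨rfl,rfl⟩|⟨rfl,rfl⟩|⟨rfl,rfl⟩|⟨rfl,rfl⟩ <;> decide
    | none =>
      simp only [hg]
      have hc := core_eq ((PySem.Str.split? s "_").getD [])
      rw [show parts_of s = ((PySem.Str.split? s "_").getD []).filter (fun p => !(p == "")) from rfl]
      set qs := ((PySem.Str.split? s "_").getD []).filter (fun p => !(p == "")) with hqs
      by_cases hsc : slot_canon (pick_first qs allowedSet) = true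
      · rw [if_pos hsc, ← hc, if_pos hsc]
        cases hpf : pick_first qs allowedSet with
        | none => rw [hpf] at hsc; cases hsc
        | some c => rfl
      · rw [if_neg hsc, ← hc, if_neg hsc]

-- ===== VERDICT (by name: the statement is the Claim_ definition above) =====
theorem norm_slot_spec : Claim_equal_norm_slot := by
  intro x _
  unfold Spec_norm_slot
  exact norm_slot_eq x
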